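-- pv_equiv track=rewrite | github.com/dmf-unicatt/latex-packages | tests/run_tests.py | check_ordered_subsequence_with_missing
-- ===== SOURCE A (Python) =====
-- def check_ordered_subsequence_with_missing(expected_lines: list[str], actual_lines: list[str]) -> bool:
--     """
--     Check if expected_lines appear in actual_lines in order.
--
--     Returns
--     -------
--     A boolean to indicate success or not.
--     """
--     expected_lines = [normalize_text(line)[0] for line in expected_lines if line.strip()]
--     actual_lines = [normalize_text(line)[0] for line in actual_lines if line.strip()]
--
--     expected_idx = 0
--     missing = []
--     for line in actual_lines:
--         if expected_idx >= len(expected_lines):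
--             break
--         if expected_lines[expected_idx] in line:
--             expected_idx += 1
--     return (expected_idx == len(expected_lines))
--
-- def normalize_text(text: str) -> list[str]:
--     """
--     Normalize a block of text for whitespace-insensitive comparisons.
--
--     This function:
--       - Splits the text into lines.
--       - Removes **all** whitespace characters (spaces, tabs, etc.) from each line.
--       - Discards any lines that become empty after whitespace removal.
--
--     Parameters
--     ----------
--     text
--         The input text block.
--
--     Returns
--     -------
--     :
--         List of normalized lines with all whitespace removed and empty lines discarded.
--     """
--     return ["".join(line.split()) for line in text.splitlines() if line.strip()]
-- ===== SOURCE B (Python) =====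
-- def normalize_text(text: str) -> list[str]:
--     return ["".join(line.split()) for line in text.splitlines() if line.strip()]
--
--
-- def check_ordered_subsequence_with_missing(expected_lines: list[str], actual_lines: list[str]) -> bool:
--     expected_lines = [normalize_text(line)[0] for line in expected_lines if line.strip()]
--     actual_lines = [normalize_text(line)[0] for line in actual_lines if line.strip()]
--
--     # Bottom-up dynamic-programming table over suffixes:
--     # row[j] == True  iff the remaining expected lines can be matched, in order,
--     # inside actual_lines[j:].  Start with no expected lines (all True) and fold
--     # the expected lines in from the last to the first.
--     m = len(actual_lines)
--     row = [True] * (m + 1)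
--     for e in reversed(expected_lines):
--         new = [False] * (m + 1)
--         for j in range(m - 1, -1, -1):
--             new[j] = (e in actual_lines[j] and row[j + 1]) or new[j + 1]
--         row = new
--     return row[0]
-- ===== Notes on version B (the rewrite author's own statement) =====
-- stated objective: alternative
-- what changed: Replaces A's greedy single-pass pointer scan by a bottom-up dynamic-programming table over suffixes (row[j] = remaining expected lines matchable inside actual_lines[j:]), folding the expected lines in from the last to the first; correct because the ordered-subsequence property satisfies the classic subsequence DP recurrence, and greedy earliest matching decides the same predicate; the table costs more work than the greedy scan on large inputs.
import Mathlib
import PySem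

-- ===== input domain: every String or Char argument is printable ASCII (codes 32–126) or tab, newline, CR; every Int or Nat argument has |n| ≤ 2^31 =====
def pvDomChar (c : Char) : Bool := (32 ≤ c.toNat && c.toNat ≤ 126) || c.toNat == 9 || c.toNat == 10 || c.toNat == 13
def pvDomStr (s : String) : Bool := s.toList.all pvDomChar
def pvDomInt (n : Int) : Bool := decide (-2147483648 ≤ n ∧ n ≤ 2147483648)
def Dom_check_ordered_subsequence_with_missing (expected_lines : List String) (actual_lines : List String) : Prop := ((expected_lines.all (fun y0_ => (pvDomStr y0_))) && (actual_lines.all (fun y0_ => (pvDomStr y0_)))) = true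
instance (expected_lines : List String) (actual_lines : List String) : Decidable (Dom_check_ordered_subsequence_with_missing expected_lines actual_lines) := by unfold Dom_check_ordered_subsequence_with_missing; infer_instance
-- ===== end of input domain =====

-- B keeps A's normalization but replaces the greedy pointer scan with a bottom-up
-- dynamic-programming table over suffixes of the actual lines (alternative algorithm).

-- ===== PORT A =====
-- module helper normalize_text, shared by both sources verbatim
def pvNormalizeText (text : String) : List String :=
  ((PySem.Str.splitlines text).filter (fun l => !(PySem.Str.strip l == ""))).map
    (fun l => PySem.Str.join "" (PySem.Str.split₀ l))

-- '[normalize_text(line)[0] for line in lines if line.strip()]' — the [0] cannot raise: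
-- the 'if line.strip()' guard makes normalize_text(line) nonempty, so headD "" is exact there.
def pvNormLines (lines : List String) : List String :=
  (lines.filter (fun l => !(PySem.Str.strip l == ""))).map (fun l => (pvNormalizeText l).headD "")

-- the for-loop over actual_lines, carrying expected_idx; the break is the '≥ length' stop
def pvALoop (exps : List String) (acts : List String) (idx : Nat) : Nat :=
  match acts with
  | [] => idx
  | l :: rest =>
    if exps.length ≤ idx then idx
    else if PySem.Str.isIn (exps.getD idx "") l then pvALoop exps rest (idx + 1)
    else pvALoop exps rest idx

def check_ordered_subsequence_with_missing (expected_lines : List String) (actual_lines : List String) : Bool :=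
  let exps := pvNormLines expected_lines
  let acts := pvNormLines actual_lines
  pvALoop exps acts 0 == exps.length

-- ===== PORT B =====
-- the inner 'for j in range(m-1, -1, -1)' loop builds the new row back-to-front from
-- row (old row, suffix row.tail holds row[j+1..]) ; ported as right-recursion over the
-- actual lines paired with the old row, producing exactly the same entries in the same order.
-- new[m] = False is the initial cell the Python loop never writes: the base case [false].
def pvRowStep (e : String) (acts : List String) (row : List Bool) : List Bool :=
  match acts with
  | [] => [false]
  | a :: as =>
    let rs := row.tail
    let t := pvRowStep e as rs
    ((PySem.Str.isIn e a && rs.getD 0 false) || t.getD 0 false) :: t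

-- 'row = [True]*(m+1); for e in reversed(expected): row = step(e, row); return row[0]'
-- (row[0] ported as getD 0 false: the row always has length m+1 ≥ 1, so the index is in range)
def check_ordered_subsequence_with_missing_alt (expected_lines : List String) (actual_lines : List String) : Bool :=
  let exps := pvNormLines expected_lines
  let acts := pvNormLines actual_lines
  (exps.foldr (fun e row => pvRowStep e acts row) (List.replicate (acts.length + 1) true)).getD 0 false

-- ===== PRECONDITION & SPEC =====
def Spec_check_ordered_subsequence_with_missing (expected_lines : List String) (actual_lines : List String) (out : Bool) : Prop := out = check_ordered_subsequence_with_missing_alt expected_lines actual_lines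
instance (expected_lines : List String) (actual_lines : List String) (out : Bool) : Decidable (Spec_check_ordered_subsequence_with_missing expected_lines actual_lines out) := by unfold Spec_check_ordered_subsequence_with_missing; infer_instance

-- ===== CLAIM (what is proved, stated in full; the proofs are below) =====
def Claim_equal_check_ordered_subsequence_with_missing : Prop := ∀ (expected_lines : List String) (actual_lines : List String), Dom_check_ordered_subsequence_with_missing expected_lines actual_lines → Spec_check_ordered_subsequence_with_missing expected_lines actual_lines (check_ordered_subsequence_with_missing expected_lines actual_lines)

-- ===== LEMMAS AND PROOFS =====

-- recursive statement of the suffix DP: dpRec es as = "es matchable in order inside as"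
def dpRec : List String → List String → Bool
  | [], _ => true
  | _ :: _, [] => false
  | e :: es, a :: as => (PySem.Str.isIn e a && dpRec es as) || dpRec (e :: es) as
termination_by es as => es.length + as.length

-- greedy forward matching, the reference form of A's loop
def pvGreedy : List String → List String → Bool
  | [], _ => true
  | _ :: _, [] => false
  | e :: es, a :: as => if PySem.Str.isIn e a then pvGreedy es as else pvGreedy (e :: es) as
termination_by es as => es.length + as.length

theorem dpRec_nil (as : List String) : dpRec [] as = true := by simp [dpRec]
theorem dpRec_cons_nil (e : String) (es : List String) : dpRec (e :: es) [] = false := by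
  simp [dpRec]
theorem dpRec_cons_cons (e : String) (es : List String) (a : String) (as : List String) :
    dpRec (e :: es) (a :: as) = ((PySem.Str.isIn e a && dpRec es as) || dpRec (e :: es) as) := by
  rw [dpRec]

theorem pvGreedy_nil (as : List String) : pvGreedy [] as = true := by simp [pvGreedy]
theorem pvGreedy_cons_nil (e : String) (es : List String) : pvGreedy (e :: es) [] = false := by
  simp [pvGreedy]
theorem pvGreedy_cons_cons (e : String) (es : List String) (a : String) (as : List String) :
    pvGreedy (e :: es) (a :: as)
      = if PySem.Str.isIn e a then pvGreedy es as else pvGreedy (e :: es) as := by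
  rw [pvGreedy]

theorem dpRec_cons_act (es : List String) (a : String) (as : List String)
    (h : dpRec es as = true) : dpRec es (a :: as) = true := by
  cases es with
  | nil => exact dpRec_nil _
  | cons e es => rw [dpRec_cons_cons, h]; simp

theorem dpRec_drop_exp (e : String) (es : List String) (as : List String)
    (h : dpRec (e :: es) as = true) : dpRec es as = true := by
  induction as with
  | nil => rw [dpRec_cons_nil] at h; exact absurd h (by simp)
  | cons a as ih =>
    rw [dpRec_cons_cons, Bool.or_eq_true, Bool.and_eq_true] at h
    rcases h with ⟨_, h2⟩ | h
    · exact dpRec_cons_act es a as h2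
    · exact dpRec_cons_act es a as (ih h)

theorem greedy_eq_dpRec (as : List String) (es : List String) :
    pvGreedy es as = dpRec es as := by
  induction as generalizing es with
  | nil =>
    cases es with
    | nil => rw [pvGreedy_nil, dpRec_nil]
    | cons e es => rw [pvGreedy_cons_nil, dpRec_cons_nil]
  | cons a as ih =>
    cases es with
    | nil => rw [pvGreedy_nil, dpRec_nil]
    | cons e es =>
      rw [pvGreedy_cons_cons, dpRec_cons_cons]
      cases hin : PySem.Str.isIn e a with
      | true =>
        rw [if_pos rfl, ih es]
        cases hd : dpRec (e :: es) as with
        | false => simp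
        | true => rw [dpRec_drop_exp e es as hd]; simp
      | false =>
        rw [if_neg (by simp), ih (e :: es)]
        simp

-- A\'s loop with index idx corresponds to greedy matching of the remaining expected lines
theorem pvALoop_eq_greedy (acts : List String) (exps : List String) (idx : Nat)
    (h : idx ≤ exps.length) :
    (pvALoop exps acts idx == exps.length) = pvGreedy (exps.drop idx) acts := by
  induction acts generalizing idx with
  | nil =>
    simp only [pvALoop]
    by_cases he : idx = exps.length
    · subst he; rw [List.drop_eq_nil_of_le le_rfl, pvGreedy_nil]; simp
    · have hlt : idx < exps.length := lt_of_le_of_ne h he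
      rw [List.drop_eq_getElem_cons hlt, pvGreedy_cons_nil]
      simp [he]
  | cons l rest ih =>
    simp only [pvALoop]
    by_cases hge : exps.length ≤ idx
    · have he : idx = exps.length := le_antisymm h hge
      subst he
      rw [if_pos hge, List.drop_eq_nil_of_le le_rfl, pvGreedy_nil]; simp
    · have hlt : idx < exps.length := lt_of_not_ge hge
      rw [if_neg hge, List.drop_eq_getElem_cons hlt, pvGreedy_cons_cons]
      have hg : exps.getD idx "" = exps[idx] := List.getD_eq_getElem exps "" hlt
      rw [hg]
      cases hin : PySem.Str.isIn exps[idx] l with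
      | true =>
        rw [if_pos rfl, if_pos rfl, ih (idx + 1) hlt]
      | false =>
        rw [if_neg (by simp), if_neg (by simp), ih idx h,
          List.drop_eq_getElem_cons hlt]

-- tail/getD index shift
theorem getD_tail (row : List Bool) (k : Nat) : row.tail.getD k false = row.getD (k + 1) false := by
  cases row <;> simp

-- one DP row step preserves the row invariant
theorem pvRowStep_ok (e : String) (es : List String) (acts : List String) (row : List Bool)
    (h : ∀ k, k ≤ acts.length → row.getD k false = dpRec es (acts.drop k)) :
    ∀ k, k ≤ acts.length → (pvRowStep e acts row).getD k false = dpRec (e :: es) (acts.drop k) := by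
  induction acts generalizing row with
  | nil =>
    intro k hk
    have hk0 : k = 0 := Nat.le_zero.mp hk
    subst hk0
    rw [pvRowStep, List.drop_nil, dpRec_cons_nil]
    rfl
  | cons a as ih =>
    have hrs : ∀ k, k ≤ as.length → row.tail.getD k false = dpRec es (as.drop k) := by
      intro k hk
      rw [getD_tail]
      exact h (k + 1) (by simpa using hk)
    intro k hk
    cases k with
    | zero =>
      simp only [pvRowStep, List.getD_cons_zero, List.drop_zero]
      rw [hrs 0 (Nat.zero_le _), ih row.tail hrs 0 (Nat.zero_le _)]
      rw [List.drop_zero, dpRec_cons_cons]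
    | succ k' =>
      simp only [pvRowStep, List.getD_cons_succ, List.drop_succ_cons]
      exact ih row.tail hrs k' (by simpa using hk)

-- the folded table evaluated at index k computes dpRec on the k-th suffix
theorem foldr_rows_eq_dpRec (exps : List String) (acts : List String) :
    ∀ k, k ≤ acts.length →
      (exps.foldr (fun e row => pvRowStep e acts row) (List.replicate (acts.length + 1) true)).getD k false
        = dpRec exps (acts.drop k) := by
  induction exps with
  | nil =>
    intro k hk
    rw [List.foldr_nil, List.getD_eq_getElem _ false (by simp; omega), dpRec_nil]
    simp
  | cons e es ih =>
    intro k hk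
    rw [List.foldr_cons]
    exact pvRowStep_ok e es acts _ ih k hk

-- ===== VERDICT (by name: the statement is the Claim_ definition above) =====
theorem check_ordered_subsequence_with_missing_spec : Claim_equal_check_ordered_subsequence_with_missing := by
  intro expected_lines actual_lines _
  unfold Spec_check_ordered_subsequence_with_missing
  unfold check_ordered_subsequence_with_missing check_ordered_subsequence_with_missing_alt
  have hA := pvALoop_eq_greedy (pvNormLines actual_lines) (pvNormLines expected_lines) 0 (Nat.zero_le _)
  have hB := foldr_rows_eq_dpRec (pvNormLines expected_lines) (pvNormLines actual_lines) 0 (Nat.zero_le _)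
  simp only [List.drop_zero] at hA hB
  rw [hA, greedy_eq_dpRec, ← hB]
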